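-- pv_equiv track=rewrite | github.com/dev-arpit5462/LinkedIn-Content-Strategist | app.py | parse_topics_from_analysis
-- ===== SOURCE A (Python) =====
-- def parse_topics_from_analysis(topics_text):
--     """Extract topics from analysis"""
--     topics = []
--     lines = topics_text.split('\n')
--     current_topic = {}
--
--     for line in lines:
--         line = line.strip()
--         if line.startswith('Topic'):
--             if current_topic:
--                 topics.append(current_topic)
--             if ':' in line:
--                 current_topic = {"title": line.split(':', 1)[1].strip()}
--             else:
--                 current_topic = {"title": line}
--         elif line.startswith('Why it matters:'):
--             current_topic["why"] = line.replace('Why it matters:', '').strip()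
--         elif line.startswith('Key angle:'):
--             current_topic["angle"] = line.replace('Key angle:', '').strip()
--
--     if current_topic:
--         topics.append(current_topic)
--
--     return topics
-- ===== SOURCE B (Python) =====
-- def parse_topics_from_analysis(topics_text):
--     """Extract topics from analysis (block-split re-implementation)"""
--     stripped = [ln.strip() for ln in topics_text.split('\n')]
--     # First pass: cut the lines into blocks, a new block at each 'Topic' line;
--     # the leading (pre-first-'Topic') lines form block 0.
--     blocks = [[]]
--     for ln in stripped:
--         if ln.startswith('Topic'):
--             blocks.append([ln])
--         else:
--             blocks[-1].append(ln)
--     # Second pass: map each block to a dict.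
--     def fill(d, body):
--         for ln in body:
--             if ln.startswith('Why it matters:'):
--                 d["why"] = ln.replace('Why it matters:', '').strip()
--             elif ln.startswith('Key angle:'):
--                 d["angle"] = ln.replace('Key angle:', '').strip()
--         return d
--     result = []
--     lead = fill({}, blocks[0])
--     if lead:
--         result.append(lead)
--     for blk in blocks[1:]:
--         head = blk[0]
--         title = head.split(':', 1)[1].strip() if ':' in head else head
--         result.append(fill({"title": title}, blk[1:]))
--     return result
-- ===== Notes on version B (the rewrite author's own statement) =====
-- stated objective: alternative
-- what changed: A's single pass with a mutable current-topic dict is replaced by a two-pass block decomposition: first cut the stripped lines into 'Topic'-delimited blocks (plus a leading block), then map each block independently to its dict (title from its head line, why/angle from its body).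
import Mathlib
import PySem

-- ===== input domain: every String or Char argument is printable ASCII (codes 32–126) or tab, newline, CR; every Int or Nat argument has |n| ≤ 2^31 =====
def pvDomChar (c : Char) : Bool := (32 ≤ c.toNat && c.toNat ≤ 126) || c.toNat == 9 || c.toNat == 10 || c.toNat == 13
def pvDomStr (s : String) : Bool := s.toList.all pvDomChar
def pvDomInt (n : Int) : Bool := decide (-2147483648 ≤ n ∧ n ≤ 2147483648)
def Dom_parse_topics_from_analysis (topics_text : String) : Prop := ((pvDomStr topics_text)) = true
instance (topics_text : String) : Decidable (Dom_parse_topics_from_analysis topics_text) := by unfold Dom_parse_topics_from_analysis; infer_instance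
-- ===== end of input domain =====

-- B replaces A's single pass with a mutable current-dict by a two-pass block decomposition
-- (cut the stripped lines into 'Topic'-delimited blocks, then map each block to its dict);
-- objective: alternative decomposition, same cost.

-- ===== PORT A =====
-- one loop iteration of A, on the already-stripped line
def pvLineA (st : List (PySem.Dict String String) × PySem.Dict String String) (line : String) :
    List (PySem.Dict String String) × PySem.Dict String String :=
  if PySem.Str.startswith line "Topic" then
    let topics := if st.2.items.isEmpty then st.1 else st.1 ++ [st.2]
    if PySem.Str.isIn ":" line then
      (topics, PySem.Dict.empty.insert "title"
        (PySem.Str.strip (PySem.List.pyGetD ((PySem.Str.splitMax? line ":" 1).getD []) 1 "")))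
    else
      (topics, PySem.Dict.empty.insert "title" line)
  else if PySem.Str.startswith line "Why it matters:" then
    (st.1, st.2.insert "why" (PySem.Str.strip (PySem.Str.replace line "Why it matters:" "")))
  else if PySem.Str.startswith line "Key angle:" then
    (st.1, st.2.insert "angle" (PySem.Str.strip (PySem.Str.replace line "Key angle:" "")))
  else st

def parse_topics_from_analysis (topics_text : String) : List (List (String × String)) :=
  let lines := (PySem.Str.split? topics_text "\n").getD []  -- sep "\n" ≠ "", never none
  -- the loop body strips the line, then runs A's branch chain (pvLineA)
  let st := lines.foldl (fun st raw => pvLineA st (PySem.Str.strip raw)) ([], PySem.Dict.empty)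
  let topics := if st.2.items.isEmpty then st.1 else st.1 ++ [st.2]
  topics.map (·.items)

-- ===== PORT B =====
-- title extraction: line.split(':', 1)[1].strip() if ':' in line else line
def pvTitle (line : String) : String :=
  if PySem.Str.isIn ":" line then
    PySem.Str.strip (PySem.List.pyGetD ((PySem.Str.splitMax? line ":" 1).getD []) 1 "")
  else line

-- body of fill's loop
def pvFillStep (d : PySem.Dict String String) (line : String) : PySem.Dict String String :=
  if PySem.Str.startswith line "Why it matters:" then
    d.insert "why" (PySem.Str.strip (PySem.Str.replace line "Why it matters:" ""))
  else if PySem.Str.startswith line "Key angle:" then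
    d.insert "angle" (PySem.Str.strip (PySem.Str.replace line "Key angle:" ""))
  else d

-- fill(d, body)
def pvFill (d : PySem.Dict String String) (body : List String) : PySem.Dict String String :=
  body.foldl pvFillStep d

-- blocks[-1].append(x)  (blocks is never empty: it starts as [[]])
def pvAppendLast : List (List String) → String → List (List String)
  | [], x => [[x]]
  | [b], x => [b ++ [x]]
  | b :: bs, x => b :: pvAppendLast bs x

-- first-pass loop body: start a new block at a 'Topic' line, else append to the last block
def pvBlockStep (bs : List (List String)) (line : String) : List (List String) :=
  if PySem.Str.startswith line "Topic" then bs ++ [[line]] else pvAppendLast bs line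

-- second-pass body for a non-leading block: blk[0] is its 'Topic' line (headD's default is unreachable)
def pvTopicDict (blk : List String) : PySem.Dict String String :=
  pvFill (PySem.Dict.empty.insert "title" (pvTitle (blk.headD ""))) (blk.drop 1)

def parse_topics_from_analysis_alt (topics_text : String) : List (List (String × String)) :=
  let stripped := ((PySem.Str.split? topics_text "\n").getD []).map PySem.Str.strip
  let blocks := stripped.foldl pvBlockStep [[]]
  let lead := pvFill PySem.Dict.empty (blocks.headD [])
  let result := if lead.items.isEmpty then [] else [lead]
  let result := (blocks.drop 1).foldl (fun res blk => res ++ [pvTopicDict blk]) result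
  result.map (·.items)

-- ===== PRECONDITION & SPEC =====
def Spec_parse_topics_from_analysis (topics_text : String) (out : List (List (String × String))) : Prop := out = parse_topics_from_analysis_alt topics_text
instance (topics_text : String) (out : List (List (String × String))) : Decidable (Spec_parse_topics_from_analysis topics_text out) := by unfold Spec_parse_topics_from_analysis; infer_instance

-- ===== CLAIM (what is proved, stated in full; the proofs are below) =====
def Claim_equal_parse_topics_from_analysis : Prop := ∀ (topics_text : String), Dom_parse_topics_from_analysis topics_text → Spec_parse_topics_from_analysis topics_text (parse_topics_from_analysis topics_text)

-- ===== LEMMAS AND PROOFS =====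

-- the common recursive skeleton both programs compute
def pvGo : List String → PySem.Dict String String → List (PySem.Dict String String)
  | [], cur => if cur.items.isEmpty then [] else [cur]
  | l :: ls, cur =>
    if PySem.Str.startswith l "Topic" then
      (if cur.items.isEmpty then [] else [cur]) ++ pvGo ls (PySem.Dict.empty.insert "title" (pvTitle l))
    else pvGo ls (pvFillStep cur l)

-- the blocks grown from an open block `cur` by the rest of the lines
def pvBlocksFrom : List String → List String → List (List String)
  | cur, [] => [cur]
  | cur, l :: ls =>
    if PySem.Str.startswith l "Topic" then cur :: pvBlocksFrom [l] ls
    else pvBlocksFrom (cur ++ [l]) ls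

-- split the lines into (leading non-Topic lines, the Topic-headed blocks)
def pvSplitB : List String → List String × List (List String)
  | [] => ([], [])
  | l :: ls =>
    if PySem.Str.startswith l "Topic" then ([], pvBlocksFrom [l] ls)
    else (l :: (pvSplitB ls).1, (pvSplitB ls).2)

lemma pvAppendLast_eq (acc : List (List String)) (opn : List String) (x : String) :
    pvAppendLast (acc ++ [opn]) x = acc ++ [opn ++ [x]] := by
  induction acc with
  | nil => rfl
  | cons a acc ih =>
    obtain ⟨b, bs, hb⟩ : ∃ b bs, acc ++ [opn] = b :: bs := by cases acc <;> exact ⟨_, _, rfl⟩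
    show pvAppendLast (a :: (acc ++ [opn])) x = _
    rw [hb, show pvAppendLast (a :: b :: bs) x = a :: pvAppendLast (b :: bs) x from rfl, ← hb, ih]
    rfl

lemma pvFill_contains (body : List String) (d : PySem.Dict String String) (k : String)
    (h : d.contains k = true) : (pvFill d body).contains k = true := by
  induction body generalizing d with
  | nil => exact h
  | cons l body ih =>
    show (pvFill (pvFillStep d l) body).contains k = true
    apply ih
    unfold pvFillStep
    split_ifs <;> simp [PySem.Dict.contains_insert, h]

lemma pvContains_isEmpty_false (d : PySem.Dict String String) (k : String)
    (h : d.contains k = true) : d.items.isEmpty = false := by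
  obtain ⟨ps⟩ := d
  cases ps with
  | nil => simp [PySem.Dict.contains_mk] at h
  | cons p ps => simp

lemma pvTopicDict_nonempty (blk : List String) : (pvTopicDict blk).items.isEmpty = false :=
  pvContains_isEmpty_false _ "title"
    (pvFill_contains _ _ _ (PySem.Dict.contains_insert_self _ _ _))

lemma pvA_foldl (ls : List String) (ts : List (PySem.Dict String String)) (cur : PySem.Dict String String) :
    (if (ls.foldl pvLineA (ts, cur)).2.items.isEmpty then (ls.foldl pvLineA (ts, cur)).1
     else (ls.foldl pvLineA (ts, cur)).1 ++ [(ls.foldl pvLineA (ts, cur)).2]) = ts ++ pvGo ls cur := by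
  induction ls generalizing ts cur with
  | nil =>
    simp only [List.foldl_nil, pvGo]
    split <;> simp_all
  | cons l ls ih =>
    by_cases hT : PySem.Str.startswith l "Topic"
    · have hstep : pvLineA (ts, cur) l =
          ((if cur.items.isEmpty then ts else ts ++ [cur]),
            PySem.Dict.empty.insert "title" (pvTitle l)) := by
        unfold pvLineA pvTitle
        split_ifs <;> simp_all
      simp only [List.foldl_cons, hstep, ih, pvGo, hT, if_true]
      split <;> simp
    · have hstep : pvLineA (ts, cur) l = (ts, pvFillStep cur l) := by
        unfold pvLineA pvFillStep
        split_ifs <;> simp_all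
      simp only [List.foldl_cons, hstep, ih, pvGo, hT]
      simp

lemma pvBlocksFrom_eq (ls : List String) (cur : List String) :
    pvBlocksFrom cur ls = (cur ++ (pvSplitB ls).1) :: (pvSplitB ls).2 := by
  induction ls generalizing cur with
  | nil => simp [pvBlocksFrom, pvSplitB]
  | cons l ls ih =>
    simp only [pvBlocksFrom, pvSplitB]
    by_cases h : PySem.Str.startswith l "Topic" = true
    · simp only [if_pos h]
      simp
    · simp only [if_neg h, ih]
      simp

lemma pvFoldl_blockStep (ls : List String) (acc : List (List String)) (opn : List String) :
    ls.foldl pvBlockStep (acc ++ [opn]) = acc ++ pvBlocksFrom opn ls := by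
  induction ls generalizing acc opn with
  | nil => simp [pvBlocksFrom]
  | cons l ls ih =>
    simp only [List.foldl_cons, pvBlockStep]
    by_cases h : PySem.Str.startswith l "Topic" = true
    · rw [if_pos h, ih]
      simp only [pvBlocksFrom, if_pos h]
      simp
    · rw [if_neg h, pvAppendLast_eq, ih]
      simp only [pvBlocksFrom, if_neg h]

lemma pvGo_eq (ls : List String) (cur : PySem.Dict String String) :
    pvGo ls cur =
      (if (pvFill cur (pvSplitB ls).1).items.isEmpty then [] else [pvFill cur (pvSplitB ls).1])
        ++ ((pvSplitB ls).2).map pvTopicDict := by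
  induction ls generalizing cur with
  | nil => simp [pvGo, pvSplitB, pvFill]
  | cons l ls ih =>
    by_cases h : PySem.Str.startswith l "Topic"
    · have hblk := pvBlocksFrom_eq ls [l]
      have htd : pvTopicDict (([l] : List String) ++ (pvSplitB ls).1) =
          pvFill (PySem.Dict.empty.insert "title" (pvTitle l)) (pvSplitB ls).1 := rfl
      have hne := pvTopicDict_nonempty (([l] : List String) ++ (pvSplitB ls).1)
      simp only [pvGo, pvSplitB, if_pos h, ih, hblk, List.map_cons, ← htd, hne,
        Bool.false_eq_true, if_false]
      simp [pvFill]
    · simp only [pvGo, pvSplitB, if_neg h, ih]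
      rfl

-- ===== VERDICT (by name: the statement is the Claim_ definition above) =====
theorem parse_topics_from_analysis_spec : Claim_equal_parse_topics_from_analysis := by
  intro t _
  show parse_topics_from_analysis t = parse_topics_from_analysis_alt t
  simp only [parse_topics_from_analysis, parse_topics_from_analysis_alt]
  rw [← List.foldl_map (f := PySem.Str.strip) (g := pvLineA), pvA_foldl]
  have hb : (((PySem.Str.split? t "\n").getD []).map PySem.Str.strip).foldl pvBlockStep [[]]
      = (([] : List String) ++ (pvSplitB (((PySem.Str.split? t "\n").getD []).map PySem.Str.strip)).1)
        :: (pvSplitB (((PySem.Str.split? t "\n").getD []).map PySem.Str.strip)).2 := by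
    rw [show ([[]] : List (List String)) = ([] : List (List String)) ++ [[]] from rfl,
        pvFoldl_blockStep, pvBlocksFrom_eq]
    simp
  rw [hb, PySem.List.foldl_append_singleton_eq_map, pvGo_eq]
  simp
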